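-- pv_equiv track=rewrite | github.com/dengkliu/algorithms | stone_game_II.py | stoneGame2
-- ===== SOURCE A (Python) =====
-- def stoneGame2(A):
--     # write your code here
--     if not A or len(A) == 0:
--         return 0
--
--     size = len(A)
--
--     # dp[i][j] -- 从 [i, j]的最小代价
--     dp = [[0 for _ in range(2*size)] for _ in range(2*size)]
--
--     prefix_sum = [0] * (2 * size + 1)
--
--     for i in range(1, 2 * size + 1):
--         prefix_sum[i] = prefix_sum[i - 1] + A[i%size - 1]
--
--     # _len -- 合并的石子数量，当_len = 1时 合并一个石头cost是0, 最多可以合并size个石头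
--     # 所以直接从2开始算起，最多可以合并n个石子
--     for _len in range(2, size + 1):
--         # left最多可以到 2*size - _len
--         for left in range(2*size - _len + 1):
--             right = left + _len - 1
--             # 开始打擂台 初始化为最大值
--             dp[left][right] = float('inf')
--             for mid in range(left, right):
--                 range_sum = prefix_sum[right + 1] - prefix_sum[left]
--                 dp[left][right] = min(dp[left][right], \
--                         dp[left][mid] + dp[mid+1][right] + range_sum)
--
--     result = float('inf')
--
--     # 枚举起始点位置, i 从 0 到 n - 1
--     for i in range(size):
--         result = min(result, dp[i][i + size - 1])
--
--     return result
-- ===== SOURCE B (Python) =====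
-- def stoneGame2(A):
--     # Top-down memoized recursion over circular windows (start, length).
--     # Each call returns (min merge cost, total weight) of the window; the weight
--     # is obtained compositionally from the two halves of a split, so there is no
--     # prefix-sum array and no doubled array at all.
--     n = len(A)
--     if n < 2:
--         return 0
--     memo = {}
--
--     def solve(s, l):
--         if l < 2:
--             return (0, A[s])
--         key = (s, l)
--         if key in memo:
--             return memo[key]
--         best = None
--         total = None
--         for k in range(1, l):
--             cl, wl = solve(s, k)
--             cr, wr = solve((s + k) % n, l - k)
--             if total is None:
--                 total = wl + wr
--             c = cl + cr
--             if best is None or c < best: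
--                 best = c
--         res = (best + total, total)
--         memo[key] = res
--         return res
--
--     return min(solve(s, n)[0] for s in range(n))
-- ===== Notes on version B (the rewrite author's own statement) =====
-- stated objective: alternative
-- what changed: B replaces A's bottom-up (2n)x(2n) doubled-array table with staged length loops and a global prefix-sum array by demand-driven top-down recursion over the n^2 circular (start,length) windows, memoized in a dict, with each call returning a (cost, weight) pair so window weights are composed from the two halves of a split instead of being read off a prefix array; no doubled array and no prefix sums exist in B.
import Mathlib
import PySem

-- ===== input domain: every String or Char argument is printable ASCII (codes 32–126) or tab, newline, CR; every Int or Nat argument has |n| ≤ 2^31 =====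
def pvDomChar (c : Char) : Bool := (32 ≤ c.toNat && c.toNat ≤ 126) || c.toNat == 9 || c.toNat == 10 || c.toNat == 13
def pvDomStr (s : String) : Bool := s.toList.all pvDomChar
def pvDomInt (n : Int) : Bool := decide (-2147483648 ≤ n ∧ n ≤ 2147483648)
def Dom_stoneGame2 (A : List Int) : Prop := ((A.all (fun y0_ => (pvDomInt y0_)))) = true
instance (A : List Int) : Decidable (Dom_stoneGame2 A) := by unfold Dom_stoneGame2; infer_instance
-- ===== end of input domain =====

-- B replaces A's bottom-up (2n)x(2n) doubled-array table (staged length loops + a global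
-- prefix-sum array) by demand-driven top-down recursion over circular (start,length) windows,
-- memoized in a dict, each call returning a (cost, weight) pair; same asymptotic cost.

-- ===== PORT A =====
-- running minimum started from float('inf'): `none` plays the role of inf, `minO` is `min`
-- (shared by both ports: Python's `if best is None or c < best` update is the same operation)
def minO (o : Option Int) (x : Int) : Option Int :=
  some (match o with | none => x | some a => min a x)

-- dp[l][r] read / write of the 2-dimensional Python list
def dpGet (dp : List (List Int)) (l r : Int) : Int :=
  PySem.List.pyGetD (PySem.List.pyGetD dp l []) r 0

def dpSet (dp : List (List Int)) (l r v : Int) : List (List Int) :=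
  PySem.List.pySetD dp l (PySem.List.pySetD (PySem.List.pyGetD dp l []) r v)

-- A[i % size - 1]  (index -1 wraps to the last element, exactly as in Python)
def aIdx (A : List Int) (i : Int) : Int :=
  (PySem.List.pyGet? A (PySem.Int.mod i (A.length : Int) - 1)).getD 0

-- the loop 'for i in range(1, 2*size+1): prefix_sum[i] = prefix_sum[i-1] + A[i%size-1]'
def preA (A : List Int) : Nat → Int
  | 0 => 0
  | i+1 => preA A i + aIdx A ((i : Int)+1)

def stoneGame2 (A : List Int) : Int :=
  if A = [] then 0
  else
    let n := A.length
    let size : Int := (n : Int)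
    -- dp = [[0 ...] ...]; the float('inf') Python writes before the mid-loop is always
    -- overwritten (the mid-loop is nonempty for _len ≥ 2), so the single write of the final
    -- running minimum below builds the same table; range_sum is the same value at every mid,
    -- computed once here.
    let dp0 : List (List Int) := List.replicate (2*n) (List.replicate (2*n) (0:Int))
    let dp : List (List Int) :=
      (PySem.List.pyRange 2 (size+1) 1).foldl (fun dp len =>
        (PySem.List.pyRange 0 (2*size - len + 1) 1).foldl (fun dp left =>
          let right := left + len - 1
          let rs := preA A (right+1).toNat - preA A left.toNat
          let v := (PySem.List.pyRange left right 1).foldl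
              (fun acc mid => minO acc (dpGet dp left mid + dpGet dp (mid+1) right + rs)) none
          dpSet dp left right (v.getD 0)) dp) dp0
    (((PySem.List.pyRange 0 size 1).foldl
        (fun acc i => minO acc (dpGet dp i (i + size - 1))) none).getD 0)

-- ===== PORT B =====
-- solve(s, l): returns (memo', (min merge cost, total weight)) of the l stones starting at
-- circular position s; the dict memo is threaded through the calls exactly as Python's
-- closure-captured dict is mutated.  A[s] is always in range at the call sites (s < n),
-- ported as pyGet? with a default that is never used; best/total start as Python's None.
def solveB (A : List Int) (n : Nat) : (l : Nat) → (s : Nat) →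
    PySem.Dict (Nat × Nat) (Int × Int) → PySem.Dict (Nat × Nat) (Int × Int) × (Int × Int)
  | 0, s, memo => (memo, (0, (PySem.List.pyGet? A (s:Int)).getD 0))
  | 1, s, memo => (memo, (0, (PySem.List.pyGet? A (s:Int)).getD 0))
  | l+2, s, memo =>
    match memo.get? (s, l+2) with
    | some v => (memo, v)
    | none =>
      -- for k in range(1, l): ...  with state (memo, best, total)
      let st := (List.range (l+1)).attach.foldl
        (fun (st : PySem.Dict (Nat × Nat) (Int × Int) × Option Int × Option Int) j =>
          let k := j.1 + 1
          let r1 := solveB A n k s st.1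
          let r2 := solveB A n (l+2-k) ((s+k) % n) r1.1
          let total := match st.2.2 with | none => some (r1.2.2 + r2.2.2) | some t => some t
          let best := minO st.2.1 (r1.2.1 + r2.2.1)
          (r2.1, best, total))
        (memo, (none : Option Int), (none : Option Int))
      let res : Int × Int := (st.2.1.getD 0 + st.2.2.getD 0, st.2.2.getD 0)
      (st.1.insert (s, l+2) res, res)
termination_by l s memo => l
decreasing_by
  all_goals (have hj := j.2; simp only [List.mem_range] at hj; omega)

def stoneGame2_alt (A : List Int) : Int :=
  let n := A.length
  if n < 2 then 0
  else
    -- min(solve(s, n)[0] for s in range(n)); the memo dict persists across the generator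
    let r := (List.range n).foldl
      (fun (st : PySem.Dict (Nat × Nat) (Int × Int) × Option Int) s =>
        let r := solveB A n n s st.1
        (r.1, minO st.2 r.2.1))
      (PySem.Dict.empty, (none : Option Int))
    r.2.getD 0

-- ===== PRECONDITION & SPEC =====
def Spec_stoneGame2 (A : List Int) (out : Int) : Prop := out = stoneGame2_alt A
instance (A : List Int) (out : Int) : Decidable (Spec_stoneGame2 A out) := by unfold Spec_stoneGame2; infer_instance

-- ===== CLAIM (what is proved, stated in full; the proofs are below) =====
def Claim_equal_stoneGame2 : Prop := ∀ (A : List Int), Dom_stoneGame2 A → Spec_stoneGame2 A (stoneGame2 A)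

-- ===== LEMMAS AND PROOFS =====

-- the common mathematical skeleton: C A l s = minimum cost of merging the l consecutive
-- stones starting at circular position s, circ A s l = their total weight
def circ (A : List Int) (s l : Nat) : Int :=
  ((List.range l).map (fun t => A.getD ((s + t) % A.length) 0)).sum

def C (A : List Int) : Nat → Nat → Int
  | 0, _ => 0
  | 1, _ => 0
  | l+2, s =>
    ((List.range (l+1)).attach.map
      (fun j => C A (j.1+1) s + C A (l+1-j.1) ((s+j.1+1) % A.length))).foldl min
      (C A 1 s + C A (l+1) ((s+1) % A.length))
    + circ A s (l+2)
termination_by l _ => l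
decreasing_by
  all_goals try omega
  all_goals (have hj := j.2; simp only [List.mem_range] at hj; simp; omega)

-- the j-th candidate split of an (l+2)-stone window starting at s
def ct (A : List Int) (l s j : Nat) : Int :=
  C A (j+1) s + C A (l+1-j) ((s+j+1) % A.length)

lemma C_one (A : List Int) (s : Nat) : C A 1 s = 0 := by simp [C]

lemma attach_map_range {β : Type} (n : Nat) (g : Nat → β) :
    (List.range n).attach.map (fun j => g j.1) = (List.range n).map g := by
  have h1 : (List.range n).attach.map (fun j => g j.1)
      = ((List.range n).attach.map (fun j => j.1)).map g := by
    rw [List.map_map]; rfl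
  rw [h1, List.attach_map_subtype_val]

lemma C_rec (A : List Int) (l s : Nat) :
    C A (l+2) s =
      (List.range l).foldl (fun a j => min a (ct A l s (j+1))) (ct A l s 0) + circ A s (l+2) := by
  rw [C]
  rw [attach_map_range (l+1) (fun j => C A (j+1) s + C A (l+1-j) ((s+j+1) % A.length))]
  rw [List.range_succ_eq_map]
  simp only [List.map_cons, List.foldl_cons, List.map_map]
  congr 1
  have hinit : min (C A 1 s + C A (l+1) ((s+1) % A.length))
      (C A (0+1) s + C A (l+1-0) ((s+0+1) % A.length)) = ct A l s 0 := by
    simp [ct]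
  rw [hinit, List.foldl_map]
  apply PySem.List.foldl_congr_mem
  intro acc j _
  rfl

lemma minO_foldl {α : Type} (L : List α) (f : α → Int) (a : Int) :
    L.foldl (fun acc x => minO acc (f x)) (some a) = some (L.foldl (fun acc x => min acc (f x)) a) := by
  induction L generalizing a with
  | nil => rfl
  | cons x t ih => simp only [List.foldl_cons, minO]; exact ih _

lemma minO_foldl_cons {α : Type} (x : α) (t : List α) (f : α → Int) :
    (x :: t).foldl (fun acc y => minO acc (f y)) none
      = some (t.foldl (fun acc y => min acc (f y)) (f x)) := by
  simp only [List.foldl_cons, minO]; exact minO_foldl t f (f x)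

lemma foldl_min_add {α : Type} (L : List α) (f : α → Int) (c : Int) :
    ∀ b, L.foldl (fun a x => min a (f x + c)) (b + c) = L.foldl (fun a x => min a (f x)) b + c := by
  induction L with
  | nil => intro b; rfl
  | cons x t ih =>
    intro b
    rw [List.foldl_cons, List.foldl_cons, min_add_add_right]
    exact ih _

-- loop invariant carrier for 'for v in range(a, b): s = f(s, v)'
lemma pyRange_foldl_inv {σ : Type} (P : Int → σ → Prop) (f : σ → Int → σ) (b : Int) :
    ∀ (k : Nat) (a : Int) (s : σ), (b - a).toNat = k → a ≤ b →
      (∀ m t, a ≤ m → m < b → P m t → P (m+1) (f t m)) → P a s →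
      P b ((PySem.List.pyRange a b 1).foldl f s) := by
  intro k
  induction k with
  | zero =>
    intro a s hk hab _ hs
    have hba : b = a := by omega
    subst hba
    rw [PySem.List.pyRange_one_eq_nil (le_refl b)]
    exact hs
  | succ k ih =>
    intro a s hk hab hstep hs
    have hlt : a < b := by omega
    rw [PySem.List.pyRange_one_cons hlt]
    simp only [List.foldl_cons]
    exact ih (a+1) (f s a) (by omega) (by omega)
      (fun m t h1 h2 => hstep m t (by omega) h2) (hstep a s (le_refl _) hlt hs)

lemma aIdx_eq (A : List Int) (h : A ≠ []) (i : Nat) :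
    aIdx A ((i:Int)+1) = A.getD (i % A.length) 0 := by
  have hn : 0 < A.length := by cases A with | nil => exact absurd rfl h | cons x t => simp
  unfold aIdx
  have h1 : ((i:Int)+1) = (((i+1 : Nat)) : Int) := by push_cast; ring
  rw [h1, PySem.Int.mod_natCast]
  have h2 : (i+1) % A.length = (i % A.length + 1) % A.length := by
    conv_lhs => rw [← Nat.mod_add_mod]
  have hr : i % A.length < A.length := Nat.mod_lt _ hn
  rcases eq_or_lt_of_le (Nat.succ_le_of_lt hr) with he | hlt
  · have he' : i % A.length + 1 = A.length := he
    have h3 : (i+1) % A.length = 0 := by rw [h2, he', Nat.mod_self]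
    rw [h3]
    have h4 : (((0:Nat):Int)) - 1 = -1 := by norm_num
    rw [h4, PySem.List.pyGet?_neg_one, List.getLast?_eq_getElem?]
    have h5 : i % A.length = A.length - 1 := by omega
    rw [h5, List.getD_eq_getElem?_getD]
  · have h3 : (i+1) % A.length = i % A.length + 1 := by rw [h2]; exact Nat.mod_eq_of_lt hlt
    rw [h3]
    have h4 : ((((i % A.length + 1 : Nat)) : Int)) - 1 = ((i % A.length : Nat) : Int) := by
      push_cast; ring
    rw [h4, PySem.List.pyGet?_natCast, List.getD_eq_getElem?_getD]

def spre (A : List Int) (i : Nat) : Int :=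
  ((List.range i).map (fun j => A.getD (j % A.length) 0)).sum

lemma preA_eq (A : List Int) (h : A ≠ []) (i : Nat) : preA A i = spre A i := by
  induction i with
  | zero => simp [preA, spre]
  | succ i ih =>
    show preA A i + aIdx A ((i:Int)+1) = _
    rw [ih, aIdx_eq A h i]
    simp [spre, List.range_succ]

lemma rs_eq (A : List Int) (h : A ≠ []) (l len : Nat) :
    preA A (l+len) - preA A l = circ A (l % A.length) len := by
  rw [preA_eq A h, preA_eq A h]
  have h1 : spre A (l+len)
      = spre A l + ((List.range len).map (fun t => A.getD ((l+t) % A.length) 0)).sum := by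
    simp only [spre, List.range_add, List.map_append, List.map_map, List.sum_append]
    rfl
  have h2 : ((List.range len).map (fun t => A.getD ((l+t) % A.length) 0)).sum
      = circ A (l % A.length) len := by
    unfold circ
    congr 1
    apply List.map_congr_left
    intro t _
    rw [Nat.mod_add_mod]
  rw [h1, h2]; ring

-- ===== A-side invariants =====

def Dims (n : Nat) (dp : List (List Int)) : Prop :=
  dp.length = 2*n ∧ ∀ row ∈ dp, row.length = 2*n

def Cells (A : List Int) (m : Int) (dp : List (List Int)) : Prop :=
  ∀ l r : Nat, l ≤ r → r < 2*A.length → ((r - l + 1 : Nat) : Int) < m →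
    dpGet dp (l:Int) (r:Int) = C A (r-l+1) (l % A.length)

lemma dpGet_replicate (n l r : Nat) (hl : l < 2*n) :
    dpGet (List.replicate (2*n) (List.replicate (2*n) (0:Int))) (l:Int) (r:Int) = 0 := by
  unfold dpGet
  rw [PySem.List.pyGetD_natCast, PySem.List.pyGetD_natCast]
  simp only [List.getD_eq_getElem?_getD, List.getElem?_replicate, if_pos hl]
  simp only [Option.getD_some]
  rw [List.getElem?_replicate]
  split <;> rfl

lemma dims_dpSet (n : Nat) (dp : List (List Int)) (hd : Dims n dp) (l r : Nat)
    (hl : l < 2*n) (v : Int) : Dims n (dpSet dp (l:Int) (r:Int) v) := by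
  obtain ⟨hlen, hrow⟩ := hd
  unfold dpSet
  rw [PySem.List.pySetD_natCast]
  refine ⟨by simp [hlen], ?_⟩
  intro row hmem
  rcases List.mem_or_eq_of_mem_set hmem with hmem' | heq
  · exact hrow _ hmem'
  · subst heq
    rw [PySem.List.pySetD_natCast, List.length_set]
    apply hrow
    rw [PySem.List.pyGetD_natCast, List.getD_eq_getElem?_getD,
      List.getElem?_eq_getElem (by omega)]
    exact List.getElem_mem _

lemma dpGet_dpSet (n : Nat) (dp : List (List Int)) (hd : Dims n dp) (l r : Nat)
    (hl : l < 2*n) (hr : r < 2*n) (v : Int) (l' r' : Nat) :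
    dpGet (dpSet dp (l:Int) (r:Int) v) (l':Int) (r':Int)
      = if l' = l ∧ r' = r then v else dpGet dp (l':Int) (r':Int) := by
  obtain ⟨hlen, hrow⟩ := hd
  have hmem : PySem.List.pyGetD dp (l:Int) [] ∈ dp := by
    rw [PySem.List.pyGetD_natCast, List.getD_eq_getElem?_getD,
      List.getElem?_eq_getElem (by omega)]
    exact List.getElem_mem _
  have hrowlen : (PySem.List.pyGetD dp (l:Int) []).length = 2*n := hrow _ hmem
  unfold dpGet dpSet
  rw [PySem.List.pyGetD_pySetD_natCast dp l l' _ [] (by omega)]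
  by_cases hl' : l' = l
  · subst hl'
    rw [if_pos rfl]
    rw [PySem.List.pyGetD_pySetD_natCast (PySem.List.pyGetD dp (l':Int) []) r r' v 0
      (by omega)]
    by_cases hr' : r' = r
    · subst hr'
      rw [if_pos rfl, if_pos ⟨rfl, rfl⟩]
    · rw [if_neg hr', if_neg (by tauto)]
  · rw [if_neg hl', if_neg (by tauto)]

lemma foldl_min_congr (L : List Nat) (f g : Nat → Int) (b c : Int) (hb : b = c)
    (hfg : ∀ j ∈ L, f j = g j) :
    L.foldl (fun a j => min a (f j)) b = L.foldl (fun a j => min a (g j)) c := by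
  subst hb
  apply PySem.List.foldl_congr_mem
  intro acc j hj
  rw [hfg j hj]

lemma pyRange_eq_map (a b : Int) :
    PySem.List.pyRange a b 1 = (List.range (b-a).toNat).map (fun k : Nat => a + (k:Int)) := by
  rw [PySem.List.pyRange_one]

-- the heart of the A side: with all shorter windows correct, the mid-loop computes C
lemma cell_value (A : List Int) (h : A ≠ []) (M left : Nat) (h2 : 2 ≤ M) (hMn : M ≤ A.length)
    (hleft : left + M ≤ 2*A.length) (dp : List (List Int)) (hdp : Cells A (M:Int) dp) :
    ((PySem.List.pyRange (left:Int) ((left:Int)+(M:Int)-1) 1).foldl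
        (fun acc mid => minO acc
          (dpGet dp (left:Int) mid + dpGet dp (mid+1) ((left:Int)+(M:Int)-1)
            + (preA A ((left:Int)+(M:Int)-1+1).toNat - preA A ((left:Int)).toNat))) none)
      = some (C A M (left % A.length)) := by
  obtain ⟨l', rfl⟩ : ∃ l', M = l'+2 := ⟨M-2, by omega⟩
  have hn : 0 < A.length := by
    cases A with | nil => exact absurd rfl h | cons x t => simp
  have hf : ∀ k : Nat, k ≤ l' →
      dpGet dp (left:Int) ((left:Int) + (k:Int))
        + dpGet dp ((left:Int) + (k:Int) + 1) ((left:Int)+((l'+2:Nat):Int)-1)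
        + (preA A ((left:Int)+((l'+2:Nat):Int)-1+1).toNat - preA A ((left:Int)).toNat)
      = ct A l' (left % A.length) k + circ A (left % A.length) (l'+2) := by
    intro k hk
    have e1 : ((left:Int) + (k:Int)) = (((left+k : Nat)) : Int) := by push_cast; ring
    have e2 : ((left:Int) + (k:Int) + 1) = (((left+k+1 : Nat)) : Int) := by push_cast; ring
    have e3 : ((left:Int) + ((l'+2:Nat):Int) - 1) = (((left + (l'+1) : Nat)) : Int) := by
      push_cast; ring
    have e4 : ((left:Int) + ((l'+2:Nat):Int) - 1 + 1).toNat = left + (l'+2) := by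
      push_cast; omega
    have e5 : ((left:Int)).toNat = left := by omega
    rw [e2, e1, e4, e3, e5]
    rw [hdp left (left+k) (by omega) (by omega) (by push_cast; omega)]
    rw [hdp (left+k+1) (left+(l'+1)) (by omega) (by omega) (by push_cast; omega)]
    rw [rs_eq A h left (l'+2)]
    rw [show left+k-left+1 = k+1 by omega,
      show left+(l'+1)-(left+k+1)+1 = l'+1-k by omega,
      show left+k+1 = left+(k+1) by omega, ← Nat.mod_add_mod]
    unfold ct
    rw [show left % A.length + (k+1) = left % A.length + k + 1 by omega]
  have hrange : PySem.List.pyRange (left:Int) ((left:Int)+((l'+2:Nat):Int)-1) 1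
      = (List.range (l'+1)).map (fun k : Nat => (left:Int) + (k:Int)) := by
    rw [pyRange_eq_map]
    rw [show (((left:Int)+((l'+2:Nat):Int)-1) - (left:Int)).toNat = l'+1 by push_cast; omega]
  rw [hrange, List.range_succ_eq_map, List.map_cons, List.map_map]
  rw [minO_foldl_cons]
  congr 1
  rw [List.foldl_map]
  refine Eq.trans (foldl_min_congr (List.range l') _
      (fun j => ct A l' (left % A.length) (j+1) + circ A (left % A.length) (l'+2)) _
      (ct A l' (left % A.length) 0 + circ A (left % A.length) (l'+2)) ?_ ?_) ?_
  · exact hf 0 (by omega)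
  · intro j hj
    simp only [List.mem_range] at hj
    exact hf (j+1) (by omega)
  · rw [foldl_min_add (List.range l') (fun j => ct A l' (left % A.length) (j+1))
      (circ A (left % A.length) (l'+2)) (ct A l' (left % A.length) 0)]
    rw [← C_rec]

-- ===== assembled halves =====

def ans (A : List Int) : Int :=
  (List.range (A.length - 1)).foldl (fun a j => min a (C A A.length (j+1))) (C A A.length 0)

-- what a correct full table yields at the final scan
lemma final_cell (A : List Int) (dp : List (List Int))
    (hC : Cells A ((A.length:Int)+1) dp) (h2 : 2 ≤ A.length) (i : Nat) (hi : i < A.length) :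
    dpGet dp (0+(i:Int)) (0+(i:Int)+(A.length:Int)-1) = C A A.length i := by
  have e1 : (0+(i:Int)) = ((i:Nat):Int) := by omega
  have e2 : (0+(i:Int)+(A.length:Int)-1) = (((i+(A.length-1)) : Nat) : Int) := by
    push_cast; omega
  rw [e2, e1]
  rw [hC i (i+(A.length-1)) (by omega) (by omega) (by push_cast; omega)]
  rw [show i+(A.length-1)-i+1 = A.length by omega, Nat.mod_eq_of_lt hi]

lemma a_eq_ans (A : List Int) (h : 2 ≤ A.length) : stoneGame2 A = ans A := by
  have hne : A ≠ [] := by intro hA; rw [hA] at h; simp at h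
  simp only [stoneGame2, if_neg hne]
  have hDP := pyRange_foldl_inv
    (fun m dp => Dims A.length dp ∧ Cells A m dp)
    (fun dp len =>
      List.foldl
        (fun dp left =>
          dpSet dp left (left + len - 1)
            ((List.foldl
                (fun acc mid =>
                  minO acc
                    (dpGet dp left mid + dpGet dp (mid + 1) (left + len - 1) +
                      (preA A (left + len - 1 + 1).toNat - preA A left.toNat)))
                none (PySem.List.pyRange left (left + len - 1))).getD 0))
        dp (PySem.List.pyRange 0 (2 * (A.length:Int) - len + 1)))
    ((A.length:Int) + 1) (((A.length:Int) + 1 - 2).toNat) 2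
    (List.replicate (2*A.length) (List.replicate (2*A.length) (0:Int)))
    rfl (by omega)
    ?step ?base
  case base =>
    refine ⟨⟨by simp, ?_⟩, ?_⟩
    · intro row hrow
      rw [List.eq_of_mem_replicate hrow]
      simp
    · intro l r hlr hr2n hlen
      rw [dpGet_replicate A.length l r (by omega)]
      rw [show r - l + 1 = 1 by omega, C_one]
  case step =>
    intro m dp1 hm1 hm2 hP
    obtain ⟨hdims, hcells⟩ := hP
    obtain ⟨M, rfl⟩ : ∃ M : Nat, m = (M:Int) := ⟨m.toNat, by omega⟩
    have hM2 : 2 ≤ M := by exact_mod_cast hm1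
    have hMn : M ≤ A.length := by omega
    simp only []
    have istep : ∀ (t : Int) (dp2 : List (List Int)),
        0 ≤ t → t < 2 * (A.length:Int) - (M:Int) + 1 →
        ((Dims A.length dp2 ∧ Cells A (M:Int) dp2) ∧
          ∀ lf : Nat, (lf:Int) < t →
            dpGet dp2 (lf:Int) (((lf + (M-1)) : Nat):Int) = C A M (lf % A.length)) →
        ((Dims A.length
            (dpSet dp2 t (t + (M:Int) - 1)
              ((List.foldl
                  (fun acc mid =>
                    minO acc
                      (dpGet dp2 t mid + dpGet dp2 (mid + 1) (t + (M:Int) - 1) +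
                        (preA A (t + (M:Int) - 1 + 1).toNat - preA A t.toNat)))
                  none (PySem.List.pyRange t (t + (M:Int) - 1))).getD 0)) ∧
          Cells A (M:Int)
            (dpSet dp2 t (t + (M:Int) - 1)
              ((List.foldl
                  (fun acc mid =>
                    minO acc
                      (dpGet dp2 t mid + dpGet dp2 (mid + 1) (t + (M:Int) - 1) +
                        (preA A (t + (M:Int) - 1 + 1).toNat - preA A t.toNat)))
                  none (PySem.List.pyRange t (t + (M:Int) - 1))).getD 0))) ∧
          ∀ lf : Nat, (lf:Int) < t+1 →
            dpGet
              (dpSet dp2 t (t + (M:Int) - 1)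
                ((List.foldl
                    (fun acc mid =>
                      minO acc
                        (dpGet dp2 t mid + dpGet dp2 (mid + 1) (t + (M:Int) - 1) +
                          (preA A (t + (M:Int) - 1 + 1).toNat - preA A t.toNat)))
                    none (PySem.List.pyRange t (t + (M:Int) - 1))).getD 0))
              (lf:Int) (((lf + (M-1)) : Nat):Int) = C A M (lf % A.length)) := by
      intro t dp2 ht0 htb hP2
      obtain ⟨⟨hdims2, hcells2⟩, hdone⟩ := hP2
      obtain ⟨lf, rfl⟩ : ∃ lf : Nat, t = (lf:Int) := ⟨t.toNat, by omega⟩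
      have hlf2n : lf + M ≤ 2*A.length := by omega
      have hv := cell_value A hne M lf hM2 hMn hlf2n dp2 hcells2
      rw [hv, Option.getD_some]
      have eidx : ((lf:Int) + (M:Int) - 1) = (((lf+(M-1)) : Nat) : Int) := by push_cast; omega
      rw [eidx]
      refine ⟨⟨dims_dpSet A.length dp2 hdims2 lf (lf+(M-1)) (by omega) _, ?_⟩, ?_⟩
      · intro l r hlr hr2n hlen
        rw [dpGet_dpSet A.length dp2 hdims2 lf (lf+(M-1)) (by omega) (by omega) _ l r]
        rw [if_neg (by rintro ⟨rfl, rfl⟩; omega)]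
        exact hcells2 l r hlr hr2n hlen
      · intro lf' hlf'
        rw [dpGet_dpSet A.length dp2 hdims2 lf (lf+(M-1)) (by omega) (by omega) _ lf' (lf'+(M-1))]
        by_cases hx : lf' = lf
        · subst hx
          rw [if_pos ⟨rfl, rfl⟩]
        · rw [if_neg (by rintro ⟨rfl, _⟩; exact hx rfl)]
          exact hdone lf' (by omega)
    have hinner := pyRange_foldl_inv
      (fun t dp => (Dims A.length dp ∧ Cells A (M:Int) dp) ∧
        ∀ lf : Nat, (lf:Int) < t →
          dpGet dp (lf:Int) (((lf + (M-1)) : Nat):Int) = C A M (lf % A.length))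
      (fun dp left =>
        dpSet dp left (left + (M:Int) - 1)
          ((List.foldl
              (fun acc mid =>
                minO acc
                  (dpGet dp left mid + dpGet dp (mid + 1) (left + (M:Int) - 1) +
                    (preA A (left + (M:Int) - 1 + 1).toNat - preA A left.toNat)))
              none (PySem.List.pyRange left (left + (M:Int) - 1))).getD 0))
      (2 * (A.length:Int) - (M:Int) + 1) ((2 * (A.length:Int) - (M:Int) + 1 - 0).toNat) 0 dp1
      rfl (by omega)
      istep ⟨⟨hdims, hcells⟩, by intro lf hlf; exact absurd hlf (by omega)⟩
    obtain ⟨⟨hdims', hcells'⟩, hnew⟩ := hinner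
    refine ⟨hdims', ?_⟩
    intro l r hlr hr2n hlen
    by_cases hshort : ((r - l + 1 : Nat):Int) < (M:Int)
    · exact hcells' l r hlr hr2n hshort
    · have hr : r = l + (M-1) := by omega
      have hl : (l:Int) < 2 * (A.length:Int) - (M:Int) + 1 := by omega
      have := hnew l hl
      rw [hr, show l+(M-1) - l + 1 = M by omega]
      exact this
  obtain ⟨-, hC⟩ := hDP
  rw [pyRange_eq_map 0 (A.length:Int),
    show ((A.length:Int) - 0).toNat = A.length by omega,
    show List.range A.length = 0 :: (List.range (A.length-1)).map Nat.succ by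
      rw [← List.range_succ_eq_map]; congr 1; omega,
    List.map_cons, List.map_map, minO_foldl_cons, Option.getD_some, List.foldl_map]
  refine Eq.trans (foldl_min_congr (List.range (A.length-1)) _
      (fun j => C A A.length (j+1)) _ (C A A.length 0) ?_ ?_) ?_
  · exact final_cell A _ hC h 0 (by omega)
  · intro j hj
    simp only [List.mem_range] at hj
    exact final_cell A _ hC h (j+1) (by omega)
  · rfl

-- ===== B-side lemmas =====

-- splitting a circular window splits its weight
lemma circ_split (A : List Int) (s k m : Nat) :
    circ A s (k + m) = circ A s k + circ A ((s + k) % A.length) m := by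
  unfold circ
  rw [List.range_add, List.map_append, List.sum_append, List.map_map]
  have hmap : ∀ t ∈ List.range m,
      ((fun t => A.getD ((s + t) % A.length) 0) ∘ fun x => k + x) t
        = (fun t => A.getD (((s + k) % A.length + t) % A.length) 0) t := by
    intro t _
    simp only [Function.comp]
    rw [show s + (k + t) = s + k + t by omega, ← Nat.mod_add_mod]
  rw [List.map_congr_left hmap]

lemma foldl_attach {α β : Type} (L : List α) (f : β → α → β) (b : β) :
    L.attach.foldl (fun st j => f st j.1) b = L.foldl f b := by
  have h : L.attach.foldl (fun st j => f st j.1) b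
      = (L.attach.map Subtype.val).foldl f b := by
    rw [List.foldl_map]
  rw [h, List.attach_map_subtype_val]

-- loop invariant carrier for 'for j in range(n): s = f(s, j)'
lemma range_foldl_inv {σ : Type} (P : Nat → σ → Prop) (f : σ → Nat → σ) (n : Nat) (s : σ)
    (hstep : ∀ m t, m < n → P m t → P (m+1) (f t m)) (h0 : P 0 s) :
    P n ((List.range n).foldl f s) := by
  induction n with
  | zero => exact h0
  | succ n ih =>
    rw [List.range_succ, List.foldl_append, List.foldl_cons, List.foldl_nil]
    exact hstep n _ (by omega) (ih (fun m t hm => hstep m t (by omega)))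

-- every entry of the memo dict is the (cost, weight) pair of its window
def MemoInv (A : List Int) (memo : PySem.Dict (Nat × Nat) (Int × Int)) : Prop :=
  ∀ (s l : Nat) (v : Int × Int), s < A.length → memo.get? (s, l) = some v →
    v = (C A l s, circ A s l)

lemma inv_empty (A : List Int) : MemoInv A PySem.Dict.empty := by
  intro s l v _ hv
  rw [PySem.Dict.get?_empty] at hv
  exact absurd hv (by simp)

lemma pyGet_lt (A : List Int) (s : Nat) (hs : s < A.length) :
    (PySem.List.pyGet? A (s:Int)).getD 0 = A.getD s 0 := by
  rw [PySem.List.pyGet?_natCast, List.getD_eq_getElem?_getD]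

lemma solveB_spec (A : List Int) (hA : A ≠ []) :
    ∀ (l s : Nat) (memo : PySem.Dict (Nat × Nat) (Int × Int)), 1 ≤ l → s < A.length →
      MemoInv A memo →
      MemoInv A (solveB A A.length l s memo).1 ∧
      (solveB A A.length l s memo).2 = (C A l s, circ A s l) := by
  have hn : 0 < A.length := by cases A with | nil => exact absurd rfl hA | cons x t => simp
  intro l
  induction l using Nat.strong_induction_on with
  | _ l ih =>
    intro s memo hl hs hInv
    match l, hl with
    | 1, _ =>
      rw [solveB]
      refine ⟨hInv, ?_⟩
      show (0, (PySem.List.pyGet? A (s:Int)).getD 0) = _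
      rw [pyGet_lt A s hs, C_one]
      unfold circ
      simp [Nat.mod_eq_of_lt hs]
    | l+2, _ =>
      rw [solveB]
      rcases hk : PySem.Dict.get? memo (s, l+2) with _ | v
      · simp only [hk]
        rw [foldl_attach (List.range (l+1))
          (fun (st : PySem.Dict (Nat × Nat) (Int × Int) × Option Int × Option Int) j =>
            let k := j + 1
            let r1 := solveB A A.length k s st.1
            let r2 := solveB A A.length (l+2-k) ((s+k) % A.length) r1.1
            let total := match st.2.2 with | none => some (r1.2.2 + r2.2.2) | some t => some t
            let best := minO st.2.1 (r1.2.1 + r2.2.1)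
            (r2.1, best, total))
          (memo, (none : Option Int), (none : Option Int))]
        have hfold := range_foldl_inv
          (fun m (st : PySem.Dict (Nat × Nat) (Int × Int) × Option Int × Option Int) =>
            MemoInv A st.1 ∧
            st.2.2 = (if m = 0 then none else some (circ A s (l+2))) ∧
            st.2.1 = (if m = 0 then none else
              some ((List.range (m-1)).foldl (fun a j => min a (ct A l s (j+1))) (ct A l s 0))))
          (fun st j =>
            let k := j + 1
            let r1 := solveB A A.length k s st.1
            let r2 := solveB A A.length (l+2-k) ((s+k) % A.length) r1.1
            let total := match st.2.2 with | none => some (r1.2.2 + r2.2.2) | some t => some t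
            let best := minO st.2.1 (r1.2.1 + r2.2.1)
            (r2.1, best, total))
          (l+1) (memo, none, none)
          ?hstep ⟨hInv, rfl, rfl⟩
        case hstep =>
          intro m st hm hP
          obtain ⟨hI, hT, hB⟩ := hP
          have h1 := ih (m+1) (by omega) s st.1 (by omega) hs hI
          have hs2 : (s + (m+1)) % A.length < A.length := Nat.mod_lt _ hn
          have h2 := ih (l+2-(m+1)) (by omega) ((s+(m+1)) % A.length)
            (solveB A A.length (m+1) s st.1).1 (by omega) hs2 h1.1
          refine ⟨h2.1, ?_, ?_⟩
          · show (match st.2.2 with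
              | none => some ((solveB A A.length (m+1) s st.1).2.2
                  + (solveB A A.length (l+2-(m+1)) ((s+(m+1)) % A.length)
                      (solveB A A.length (m+1) s st.1).1).2.2)
              | some t => some t) = _
            rw [hT]
            by_cases hm0 : m = 0
            · subst hm0
              simp only [if_pos rfl, if_neg (by omega : ¬ (0:Nat)+1 = 0)]
              rw [h1.2, h2.2]
              show some (circ A s 1 + circ A ((s+1) % A.length) (l+2-1)) = _
              rw [← circ_split A s 1 (l+2-1), show 1+(l+2-1) = l+2 from by omega]
            · simp only [if_neg hm0, if_neg (by omega : ¬ m+1 = 0)]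
          · show minO st.2.1 ((solveB A A.length (m+1) s st.1).2.1
                + (solveB A A.length (l+2-(m+1)) ((s+(m+1)) % A.length)
                    (solveB A A.length (m+1) s st.1).1).2.1) = _
            rw [hB, h1.2, h2.2]
            have hct : (C A (m+1) s, circ A s (m+1)).1
                + (C A (l+2-(m+1)) ((s+(m+1)) % A.length),
                    circ A ((s+(m+1)) % A.length) (l+2-(m+1))).1 = ct A l s m := by
              show C A (m+1) s + C A (l+2-(m+1)) ((s+(m+1)) % A.length) = _
              unfold ct
              rw [show l+2-(m+1) = l+1-m by omega, show s+(m+1) = s+m+1 by omega]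
            rw [hct]
            by_cases hm0 : m = 0
            · subst hm0
              simp [minO]
            · simp only [if_neg hm0, if_neg (by omega : ¬ m+1 = 0), minO]
              congr 1
              rw [show m+1-1 = (m-1)+1 by omega, List.range_succ, List.foldl_append,
                List.foldl_cons, List.foldl_nil, show m-1+1 = m by omega]
        obtain ⟨hI', hT', hB'⟩ := hfold
        rw [hT', hB']
        simp only [if_neg (by omega : ¬ l+1 = 0), Option.getD_some]
        constructor
        · intro s' l' v hs' hv
          rw [PySem.Dict.get?_insert] at hv
          by_cases he : (s', l') = (s, l+2)
          · rw [if_pos he] at hv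
            rw [Prod.mk.injEq] at he
            obtain ⟨rfl, rfl⟩ := he
            rw [(Option.some_inj.mp hv).symm, C_rec, show l+1-1 = l by omega]
          · rw [if_neg he] at hv
            exact hI' s' l' v hs' hv
        · show (_, _) = _
          rw [show l+1-1 = l by omega, C_rec A l s]
      · simp only [hk]
        exact ⟨hInv, hInv s (l+2) v hs hk⟩

lemma b_eq_ans (A : List Int) (h : 2 ≤ A.length) : stoneGame2_alt A = ans A := by
  have hne : A ≠ [] := by intro hA; rw [hA] at h; simp at h
  simp only [stoneGame2_alt, if_neg (by omega : ¬ A.length < 2)]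
  have hfold := range_foldl_inv
    (fun m (st : PySem.Dict (Nat × Nat) (Int × Int) × Option Int) =>
      MemoInv A st.1 ∧
      st.2 = (if m = 0 then none else
        some ((List.range (m-1)).foldl (fun a j => min a (C A A.length (j+1)))
          (C A A.length 0))))
    (fun st s =>
      let r := solveB A A.length A.length s st.1
      (r.1, minO st.2 r.2.1))
    A.length (PySem.Dict.empty, none)
    ?hstep2 ⟨inv_empty A, rfl⟩
  case hstep2 =>
    intro m st hm hP
    obtain ⟨hI, hB⟩ := hP
    have h1 := solveB_spec A hne A.length m st.1 (by omega) hm hI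
    refine ⟨h1.1, ?_⟩
    show minO st.2 (solveB A A.length A.length m st.1).2.1 = _
    rw [hB, h1.2]
    by_cases hm0 : m = 0
    · subst hm0
      simp [minO]
    · simp only [if_neg hm0, if_neg (by omega : ¬ m+1 = 0), minO]
      congr 1
      rw [show m+1-1 = (m-1)+1 by omega, List.range_succ, List.foldl_append,
        List.foldl_cons, List.foldl_nil, show m-1+1 = m by omega]
  obtain ⟨-, hB'⟩ := hfold
  rw [hB', if_neg (by omega : ¬ A.length = 0), Option.getD_some]
  rfl

lemma small_eq (A : List Int) (h : A.length < 2) : stoneGame2 A = stoneGame2_alt A := by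
  cases A with
  | nil => rfl
  | cons x t =>
    cases t with
    | cons y u => simp at h
    | nil =>
      have h1 : stoneGame2_alt [x] = 0 := by simp [stoneGame2_alt]
      have h2 : stoneGame2 [x] = 0 := by
        simp [stoneGame2, pyRange_eq_map, dpGet, minO, PySem.List.pyGetD]
      rw [h2, h1]

-- ===== VERDICT (by name: the statement is the Claim_ definition above) =====
theorem stoneGame2_spec : Claim_equal_stoneGame2 := by
  intro A _
  unfold Spec_stoneGame2
  rcases lt_or_ge A.length 2 with h | h
  · exact small_eq A h
  · rw [a_eq_ans A h, b_eq_ans A h]
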